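-- pv_equiv track=rewrite | github.com/galiiileo/Open_Source | categories/audio_stego.py | bits_to_message_by_length
-- ===== SOURCE A (Python) =====
-- def bits_to_message_by_length(bits, byte_length):
--     needed = byte_length * 8
--     if len(bits) < needed:
--         return None
--     message = ''
--     for i in range(0, needed, 8):
--         byte = bits[i:i+8]
--         message += chr(int(byte, 2))
--     try:
--         return bytes([ord(c) for c in message]).decode('utf-8', errors='replace')
--     except Exception:
--         return message
-- ===== SOURCE B (Python) =====
-- def bits_to_message_by_length(bits, byte_length):
--     needed = byte_length * 8
--     if len(bits) < needed:
--         return None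
--     if needed <= 0:
--         return ''
--     n = int(bits[:needed], 2)
--     return n.to_bytes(byte_length, 'big').decode('utf-8', errors='replace')
-- ===== Notes on version B (the rewrite author's own statement) =====
-- stated objective: idiomatic
-- what changed: B replaces A's per-chunk loop (8-bit slices, one int() per chunk, chr() concatenation, ord() round-trip through bytes) with a single big-integer parse of the whole bit prefix followed by one to_bytes/decode call, and drops the inert try/except (decode with errors='replace' never raises).
-- outside the precondition, e.g. on bits_to_message_by_length('+0000001+0000001', 2): A returns '\x01\x01', B raises ValueError
import Mathlib
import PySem

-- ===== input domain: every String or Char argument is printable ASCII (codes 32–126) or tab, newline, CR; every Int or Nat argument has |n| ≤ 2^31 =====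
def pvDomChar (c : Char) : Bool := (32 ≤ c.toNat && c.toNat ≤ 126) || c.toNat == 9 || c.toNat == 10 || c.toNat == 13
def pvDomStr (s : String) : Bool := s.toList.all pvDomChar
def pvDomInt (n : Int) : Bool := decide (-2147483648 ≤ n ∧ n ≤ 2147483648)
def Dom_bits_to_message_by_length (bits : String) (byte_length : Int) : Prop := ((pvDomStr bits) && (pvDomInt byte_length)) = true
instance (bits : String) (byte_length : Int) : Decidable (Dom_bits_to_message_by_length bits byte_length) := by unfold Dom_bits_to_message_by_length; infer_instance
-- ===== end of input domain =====

-- B replaces A's per-8-bit-chunk loop with one whole-prefix big-integer parse plus a single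
-- bytes conversion/UTF-8 decode, dropping the inert try/except (errors='replace' never raises).


-- ===== PORT A =====
-- int(s, 2): exact on nonempty strings of '0'/'1' characters (the only form Pre_ admits);
-- Python's lenient forms ('+', '_', whitespace) are excluded by Pre_ (stated narrowing there).
def pvIntBase2? (cs : List Char) : Option Nat :=
  match cs with
  | [] => none
  | _ :: _ =>
    cs.foldl (fun acc c =>
      match acc with
      | some n => if c = '0' then some (2 * n) else if c = '1' then some (2 * n + 1) else none
      | none => none) (some 0)

-- bytes(...).decode('utf-8', errors='replace') on a list of byte values 0..255: CPython's
-- UTF-8 decoder with 'replace' (one U+FFFD per maximal subpart); never raises, so A's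
-- try/except always takes the try branch. Exactness checked against CPython on random bytes.
def pvCont (b : Nat) : Bool := 0x80 ≤ b && b ≤ 0xBF

def pvUtf8Replace : List Nat → List Char
  | [] => []
  | b :: rest =>
    if b < 0x80 then Char.ofNat b :: pvUtf8Replace rest
    else if b < 0xC2 then '\uFFFD' :: pvUtf8Replace rest
    else if b < 0xE0 then
      match rest with
      | [] => ['\uFFFD']
      | c1 :: r2 =>
        if pvCont c1 then Char.ofNat ((b - 0xC0) * 64 + (c1 - 0x80)) :: pvUtf8Replace r2
        else '\uFFFD' :: pvUtf8Replace (c1 :: r2)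
    else if b < 0xF0 then
      match rest with
      | [] => ['\uFFFD']
      | c1 :: r2 =>
        if (if b = 0xE0 then decide (0xA0 ≤ c1 ∧ c1 ≤ 0xBF)
            else if b = 0xED then decide (0x80 ≤ c1 ∧ c1 ≤ 0x9F)
            else pvCont c1) then
          match r2 with
          | [] => ['\uFFFD']
          | c2 :: r3 =>
            if pvCont c2 then
              Char.ofNat ((b - 0xE0) * 4096 + (c1 - 0x80) * 64 + (c2 - 0x80)) :: pvUtf8Replace r3
            else '\uFFFD' :: pvUtf8Replace (c2 :: r3)
        else '\uFFFD' :: pvUtf8Replace (c1 :: r2)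
    else if b < 0xF5 then
      match rest with
      | [] => ['\uFFFD']
      | c1 :: r2 =>
        if (if b = 0xF0 then decide (0x90 ≤ c1 ∧ c1 ≤ 0xBF)
            else if b = 0xF4 then decide (0x80 ≤ c1 ∧ c1 ≤ 0x8F)
            else pvCont c1) then
          match r2 with
          | [] => ['\uFFFD']
          | c2 :: r3 =>
            if pvCont c2 then
              match r3 with
              | [] => ['\uFFFD']
              | c3 :: r4 =>
                if pvCont c3 then
                  Char.ofNat ((b - 0xF0) * 262144 + (c1 - 0x80) * 4096 + (c2 - 0x80) * 64 + (c3 - 0x80)) :: pvUtf8Replace r4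
                else '\uFFFD' :: pvUtf8Replace (c3 :: r4)
            else '\uFFFD' :: pvUtf8Replace (c2 :: r3)
        else '\uFFFD' :: pvUtf8Replace (c1 :: r2)
    else '\uFFFD' :: pvUtf8Replace rest

-- A: chunk loop over range(0, needed, 8); message += chr(int(byte, 2)); the final
-- bytes([ord(c) …]) round-trips chr/ord, so the port accumulates the byte values directly.
def bits_to_message_by_length (bits : String) (byte_length : Int) : Option String :=
  let needed := byte_length * 8
  if PySem.Str.len bits < needed then none
  else
    match (PySem.List.pyRange 0 needed 8).foldl
        (fun (acc : Option (List Nat)) i =>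
          match acc, pvIntBase2? (PySem.List.slice bits.toList (some i) (some (i + 8))) with
          | some msg, some v => some (msg ++ [v])
          | _, _ => none) (some []) with
    | none => none   -- int(byte, 2) raised ValueError: excluded by Pre_
    | some msg => some (String.ofList (pvUtf8Replace msg))

-- ===== PORT B =====
-- int(bits[:needed], 2), B style: validate every character at once and read the digit string
-- as one base-2 number (Nat.ofDigits is little-endian, hence the reverse).
def pvBinDigit? (c : Char) : Option Nat :=
  if c = '0' then some 0 else if c = '1' then some 1 else none

def pvParseBin (cs : List Char) : Option Nat :=
  match cs with
  | [] => none
  | _ :: _ => (cs.mapM pvBinDigit?).map (fun ds => Nat.ofDigits 2 ds.reverse)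

-- n.to_bytes(len, 'big'); n < 256^len always holds here (n parses from 8*len bits)
def pvToBytesBE (len : Nat) (n : Nat) : List Nat :=
  (List.range len).map (fun i => n / 256 ^ (len - 1 - i) % 256)

-- .decode('utf-8', errors='replace') as an incremental state machine driven by one fold:
-- the state carries (continuation bytes still needed, accumulated code point, validity test
-- for the next byte); a dangling state at the end is one replacement character. Exactness
-- checked against CPython on random bytes.
def pvDecSt : Type := Nat × Nat × (Nat → Bool)

def pvDecStart (b : Nat) : List Char × Option pvDecSt :=
  if b < 0x80 then ([Char.ofNat b], none)
  else if b < 0xC2 then (['\uFFFD'], none)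
  else if b < 0xE0 then ([], some (1, b - 0xC0, pvCont))
  else if b < 0xF0 then
    ([], some (2, b - 0xE0, fun c =>
        if b = 0xE0 then decide (0xA0 ≤ c ∧ c ≤ 0xBF)
        else if b = 0xED then decide (0x80 ≤ c ∧ c ≤ 0x9F)
        else pvCont c))
  else if b < 0xF5 then
    ([], some (3, b - 0xF0, fun c =>
        if b = 0xF0 then decide (0x90 ≤ c ∧ c ≤ 0xBF)
        else if b = 0xF4 then decide (0x80 ≤ c ∧ c ≤ 0x8F)
        else pvCont c))
  else (['\uFFFD'], none)

def pvDecStep (s : List Char × Option pvDecSt) (b : Nat) : List Char × Option pvDecSt :=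
  match s with
  | (out, none) => let r := pvDecStart b; (out ++ r.1, r.2)
  | (out, some (need, acc, ok)) =>
    if ok b then
      if need = 1 then (out ++ [Char.ofNat (acc * 64 + (b - 0x80))], none)
      else (out, some (need - 1, acc * 64 + (b - 0x80), pvCont))
    else
      let r := pvDecStart b
      (out ++ '\uFFFD' :: r.1, r.2)

def pvDecFinish (s : List Char × Option pvDecSt) : List Char :=
  match s with
  | (out, none) => out
  | (out, some _) => out ++ ['\uFFFD']

def pvDecodeSM (bs : List Nat) : List Char :=
  pvDecFinish (bs.foldl pvDecStep ([], none))

def bits_to_message_by_length_alt (bits : String) (byte_length : Int) : Option String :=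
  let needed := byte_length * 8
  if PySem.Str.len bits < needed then none
  else if needed ≤ 0 then some ""
  else
    -- none = int(bits[:needed], 2) raised ValueError: excluded by Pre_
    (pvParseBin (PySem.List.slice bits.toList none (some needed))).map
      (fun n => String.ofList (pvDecodeSM (pvToBytesBE byte_length.toNat n)))

-- ===== PRECONDITION & SPEC =====
-- Pre_ excludes the inputs on which A raises ValueError (a non-binary character in the first
-- byte_length*8 bits); as a deliberate narrowing it also excludes strings whose 8-bit chunks
-- parse only through int()'s lenient syntax ('+', '_', whitespace) — there A's per-chunk
-- values are an artefact of chunkwise int() and B's single whole-prefix parse raises ValueError.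
def Pre_bits_to_message_by_length (bits : String) (byte_length : Int) : Prop :=
  byte_length ≤ 0 ∨ PySem.Str.len bits < byte_length * 8 ∨
    (bits.toList.take (byte_length * 8).toNat).all (fun c => c == '0' || c == '1') = true
instance (bits : String) (byte_length : Int) : Decidable (Pre_bits_to_message_by_length bits byte_length) := by unfold Pre_bits_to_message_by_length; infer_instance

def pvWitness_bits_to_message_by_length : String × Int := ("01000001", 1)

def Spec_bits_to_message_by_length (bits : String) (byte_length : Int) (out : Option String) : Prop := out = bits_to_message_by_length_alt bits byte_length
instance (bits : String) (byte_length : Int) (out : Option String) : Decidable (Spec_bits_to_message_by_length bits byte_length out) := by unfold Spec_bits_to_message_by_length; infer_instance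

-- ===== CLAIM (what is proved, stated in full; the proofs are below) =====
def Claim_equal_bits_to_message_by_length : Prop := ∀ (bits : String) (byte_length : Int), Dom_bits_to_message_by_length bits byte_length → Pre_bits_to_message_by_length bits byte_length → Spec_bits_to_message_by_length bits byte_length (bits_to_message_by_length bits byte_length)

-- ===== LEMMAS AND PROOFS =====

-- value of a nonempty all-'0'/'1' string; the Option fold of pvIntBase2? computes it
def pvBinVal (cs : List Char) : Nat :=
  cs.foldl (fun n c => 2 * n + (if c = '1' then 1 else 0)) 0

theorem fold_aux (cs : List Char) (hbin : ∀ c ∈ cs, c = '0' ∨ c = '1') : ∀ (a : Nat),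
    cs.foldl (fun acc c =>
      match acc with
      | some n => if c = '0' then some (2 * n) else if c = '1' then some (2 * n + 1) else none
      | none => none) (some a)
    = some (cs.foldl (fun n c => 2 * n + (if c = '1' then 1 else 0)) a) := by
  induction cs with
  | nil => intro a; rfl
  | cons c cs ih =>
    intro a
    have hc := hbin c (by simp)
    have hrest : ∀ x ∈ cs, x = '0' ∨ x = '1' := fun x hx => hbin x (by simp [hx])
    rcases hc with h | h <;> subst h <;> simp [List.foldl_cons, ih hrest]

theorem pvIntBase2?_eq (cs : List Char) (hne : cs ≠ [])
    (hbin : ∀ c ∈ cs, c = '0' ∨ c = '1') : pvIntBase2? cs = some (pvBinVal cs) := by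
  cases cs with
  | nil => exact absurd rfl hne
  | cons c cs => exact fold_aux _ hbin 0

theorem pvBinVal_from (cs : List Char) (a : Nat) :
    cs.foldl (fun n c => 2 * n + (if c = '1' then 1 else 0)) a = a * 2 ^ cs.length + pvBinVal cs := by
  induction cs generalizing a with
  | nil => simp [pvBinVal]
  | cons c cs ih =>
    simp only [List.foldl_cons, List.length_cons, pvBinVal]
    rw [ih, ih (2 * 0 + _)]; ring

theorem pvBinVal_append (xs ys : List Char) :
    pvBinVal (xs ++ ys) = pvBinVal xs * 2 ^ ys.length + pvBinVal ys := by
  simp only [pvBinVal, List.foldl_append]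
  rw [pvBinVal_from ys]; rfl

theorem pvBinVal_lt (cs : List Char) : pvBinVal cs < 2 ^ cs.length := by
  induction cs with
  | nil => simp [pvBinVal]
  | cons c cs ih =>
    simp only [pvBinVal, List.foldl_cons, List.length_cons]
    rw [pvBinVal_from]
    have : (2 * 0 + if c = '1' then 1 else 0) ≤ 1 := by split <;> omega
    have h2 : pvBinVal cs < 2 ^ cs.length := ih
    rw [pow_succ]
    nlinarith [pow_pos (by norm_num : (0:ℕ) < 2) cs.length]

-- B's parser agrees with pvBinVal on nonempty all-binary strings
theorem pvMapM_bin (cs : List Char) (hbin : ∀ c ∈ cs, c = '0' ∨ c = '1') :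
    cs.mapM pvBinDigit? = some (cs.map (fun c => if c = '1' then 1 else 0)) := by
  induction cs with
  | nil => rfl
  | cons c t ih =>
    have hc := hbin c (by simp)
    have ht : ∀ x ∈ t, x = '0' ∨ x = '1' := fun x hx => hbin x (by simp [hx])
    rcases hc with h | h <;> subst h <;>
      simp [List.mapM_cons, pvBinDigit?, ih ht]

theorem pvOfDigits_eq (l : List Char) :
    Nat.ofDigits 2 ((l.map (fun c => if c = '1' then 1 else 0)).reverse) = pvBinVal l := by
  induction l with
  | nil => simp [pvBinVal]
  | cons c t ih =>
    have h1 : pvBinVal (c :: t) = (if c = '1' then 1 else 0) * 2 ^ t.length + pvBinVal t := by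
      simp only [pvBinVal, List.foldl_cons]
      rw [pvBinVal_from]
      congr 1
      norm_num
    simp only [List.map_cons, List.reverse_cons, Nat.ofDigits_append, ih, h1,
      List.length_reverse, List.length_map]
    simp [Nat.ofDigits]
    ring

theorem pvParseBin_eq (cs : List Char) (hne : cs ≠ [])
    (hbin : ∀ c ∈ cs, c = '0' ∨ c = '1') : pvParseBin cs = some (pvBinVal cs) := by
  cases cs with
  | nil => exact absurd rfl hne
  | cons c t =>
    simp only [pvParseBin, pvMapM_bin _ hbin, Option.map_some]
    rw [pvOfDigits_eq]

-- the state-machine decoder computes the recursive decoder's output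
set_option maxRecDepth 8192 in
set_option maxHeartbeats 2000000 in
theorem pvDecodeSM_run (bs : List Nat) : ∀ (out : List Char),
    pvDecFinish (bs.foldl pvDecStep (out, none)) = out ++ pvUtf8Replace bs := by
  induction bs using pvUtf8Replace.induct with
  | case1 => intro out; simp [pvDecFinish, pvUtf8Replace]
  | case2 b r h ih =>
      intro out
      simp only [List.foldl_cons, pvDecStep, pvDecStart, pvDecFinish] at ih ⊢
      conv_rhs => rw [pvUtf8Replace.eq_def]
      simp [h, ih, List.append_assoc]
  | case3 b r h1 h2 ih =>
      intro out
      simp only [List.foldl_cons, pvDecStep, pvDecStart, pvDecFinish] at ih ⊢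
      conv_rhs => rw [pvUtf8Replace.eq_def]
      simp [h1, h2, ih, List.append_assoc]
  | case4 b h1 h2 h3 =>
      intro out
      simp only [List.foldl_cons, List.foldl_nil, pvDecStep, pvDecStart, pvDecFinish]
      conv_rhs => rw [pvUtf8Replace.eq_def]
      simp [h1, h2, h3]
  | case5 b h1 h2 h3 c1 r hc ih =>
      intro out
      try simp at hc
      simp only [List.foldl_cons, pvDecStep, pvDecStart, pvDecFinish] at ih ⊢
      conv_rhs => rw [pvUtf8Replace.eq_def]
      simp [h1, h2, h3, hc, ih, List.append_assoc]
  | case6 b h1 h2 h3 c1 r hc ih =>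
      intro out
      try simp at hc
      have key := ih (out ++ ['\uFFFD'])
      simp only [List.foldl_cons, pvDecStep, pvDecStart, pvDecFinish] at key ⊢
      conv_rhs => rw [pvUtf8Replace.eq_def]
      simp [h1, h2, h3, hc, List.append_assoc, List.cons_append] at key ⊢
      exact key
  | case7 b h1 h2 h3 h4 =>
      intro out
      simp only [List.foldl_cons, List.foldl_nil, pvDecStep, pvDecStart, pvDecFinish]
      conv_rhs => rw [pvUtf8Replace.eq_def]
      simp [h1, h2, h3, h4]
  | case8 b h1 h2 h3 h4 c1 hok =>
      intro out
      try simp at hok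
      simp only [List.foldl_cons, List.foldl_nil, pvDecStep, pvDecStart, pvDecFinish]
      conv_rhs => rw [pvUtf8Replace.eq_def]
      simp [h1, h2, h3, h4, hok]
  | case9 b h1 h2 h3 h4 c1 hok c2 r hc ih =>
      intro out
      try simp at hok
      try simp at hc
      simp only [List.foldl_cons, pvDecStep, pvDecStart, pvDecFinish] at ih ⊢
      conv_rhs => rw [pvUtf8Replace.eq_def]
      simp [h1, h2, h3, h4, hok, hc, ih, List.append_assoc]
      try (congr 1; ring)
  | case10 b h1 h2 h3 h4 c1 hok c2 r hc ih =>
      intro out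
      try simp at hok
      try simp at hc
      have key := ih (out ++ ['\uFFFD'])
      simp only [List.foldl_cons, pvDecStep, pvDecStart, pvDecFinish] at key ⊢
      conv_rhs => rw [pvUtf8Replace.eq_def]
      simp [h1, h2, h3, h4, hok, hc, List.append_assoc, List.cons_append] at key ⊢
      exact key
  | case11 b h1 h2 h3 h4 c1 r hok ih =>
      intro out
      try simp at hok
      have key := ih (out ++ ['\uFFFD'])
      simp only [List.foldl_cons, pvDecStep, pvDecStart, pvDecFinish] at key ⊢
      conv_rhs => rw [pvUtf8Replace.eq_def]
      simp [h1, h2, h3, h4, hok, List.append_assoc, List.cons_append] at key ⊢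
      exact key
  | case12 b h1 h2 h3 h4 h5 =>
      intro out
      simp only [List.foldl_cons, List.foldl_nil, pvDecStep, pvDecStart, pvDecFinish]
      conv_rhs => rw [pvUtf8Replace.eq_def]
      simp [h1, h2, h3, h4, h5]
  | case13 b h1 h2 h3 h4 h5 c1 hok =>
      intro out
      try simp at hok
      simp only [List.foldl_cons, List.foldl_nil, pvDecStep, pvDecStart, pvDecFinish]
      conv_rhs => rw [pvUtf8Replace.eq_def]
      simp [h1, h2, h3, h4, h5, hok]
  | case14 b h1 h2 h3 h4 h5 c1 hok c2 hc =>
      intro out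
      try simp at hok
      try simp at hc
      simp only [List.foldl_cons, List.foldl_nil, pvDecStep, pvDecStart, pvDecFinish]
      conv_rhs => rw [pvUtf8Replace.eq_def]
      simp [h1, h2, h3, h4, h5, hok, hc]
  | case15 b h1 h2 h3 h4 h5 c1 hok c2 hc2 c3 r hc3 ih =>
      intro out
      try simp at hok
      try simp at hc2
      try simp at hc3
      simp only [List.foldl_cons, pvDecStep, pvDecStart, pvDecFinish] at ih ⊢
      conv_rhs => rw [pvUtf8Replace.eq_def]
      simp [h1, h2, h3, h4, h5, hok, hc2, hc3, ih, List.append_assoc]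
      try (congr 1; ring)
  | case16 b h1 h2 h3 h4 h5 c1 hok c2 hc2 c3 r hc3 ih =>
      intro out
      try simp at hok
      try simp at hc2
      try simp at hc3
      have key := ih (out ++ ['\uFFFD'])
      simp only [List.foldl_cons, pvDecStep, pvDecStart, pvDecFinish] at key ⊢
      conv_rhs => rw [pvUtf8Replace.eq_def]
      simp [h1, h2, h3, h4, h5, hok, hc2, hc3, List.append_assoc, List.cons_append] at key ⊢
      exact key
  | case17 b h1 h2 h3 h4 h5 c1 hok c2 r hc2 ih =>
      intro out
      try simp at hok
      try simp at hc2
      have key := ih (out ++ ['\uFFFD'])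
      simp only [List.foldl_cons, pvDecStep, pvDecStart, pvDecFinish] at key ⊢
      conv_rhs => rw [pvUtf8Replace.eq_def]
      simp [h1, h2, h3, h4, h5, hok, hc2, List.append_assoc, List.cons_append] at key ⊢
      exact key
  | case18 b h1 h2 h3 h4 h5 c1 r hok ih =>
      intro out
      try simp at hok
      have key := ih (out ++ ['\uFFFD'])
      simp only [List.foldl_cons, pvDecStep, pvDecStart, pvDecFinish] at key ⊢
      conv_rhs => rw [pvUtf8Replace.eq_def]
      simp [h1, h2, h3, h4, h5, hok, List.append_assoc, List.cons_append] at key ⊢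
      exact key
  | case19 b r h1 h2 h3 h4 h5 ih =>
      intro out
      simp only [List.foldl_cons, pvDecStep, pvDecStart, pvDecFinish] at ih ⊢
      conv_rhs => rw [pvUtf8Replace.eq_def]
      simp [h1, h2, h3, h4, h5, ih, List.append_assoc]

theorem pvDecodeSM_eq (bs : List Nat) : pvDecodeSM bs = pvUtf8Replace bs := by
  simpa using pvDecodeSM_run bs []

-- big-endian base-256 value of a byte list, with digit extraction
def pvValBE (vs : List Nat) : Nat := vs.foldl (fun n v => 256 * n + v) 0

theorem pvValBE_snoc (vs : List Nat) (v : Nat) : pvValBE (vs ++ [v]) = 256 * pvValBE vs + v := by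
  simp [pvValBE, List.foldl_append]

theorem pvValBE_digit (vs : List Nat) (h : ∀ v ∈ vs, v < 256) :
    ∀ i (hi : i < vs.length), pvValBE vs / 256 ^ (vs.length - 1 - i) % 256 = vs[i] := by
  induction vs using List.reverseRecOn with
  | nil => intro i hi; simp at hi
  | append_singleton vs v ih =>
    intro i hi
    rw [pvValBE_snoc]
    have hv : v < 256 := h v (by simp)
    rcases Nat.lt_or_ge i vs.length with hlt | hge
    · have hlen : vs.length + 1 - 1 - i = (vs.length - 1 - i) + 1 := by omega
      simp only [List.length_append, List.length_singleton] at *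
      rw [hlen, pow_succ, Nat.mul_comm (256 ^ _) 256, ← Nat.div_div_eq_div_mul]
      have : (256 * pvValBE vs + v) / 256 = pvValBE vs := by omega
      rw [this, ih (fun x hx => h x (by simp [hx])) i hlt, List.getElem_append_left hlt]
    · have hi' : i = vs.length := by simp at hi; omega
      subst hi'
      simp only [List.length_append, List.length_singleton]
      have : vs.length + 1 - 1 - vs.length = 0 := by omega
      rw [this, pow_zero, Nat.div_one]
      have hg : (vs ++ [v])[vs.length]'(by simp) = v := by simp
      rw [hg]
      omega

-- the byte A's chunk j yields
def pvChunk (L : List Char) (j : Nat) : Nat := pvBinVal ((L.drop (8 * j)).take 8)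

theorem pvPrefix_val (L : List Char) (k : Nat) (hk : 8 * k ≤ L.length) :
    pvBinVal (L.take (8 * k)) = pvValBE ((List.range k).map (pvChunk L)) := by
  induction k with
  | zero => rfl
  | succ k ih =>
    have hk' : 8 * k ≤ L.length := by omega
    have hsplit : L.take (8 * (k+1)) = L.take (8 * k) ++ (L.drop (8 * k)).take 8 := by
      have h8 : 8 * (k+1) = 8 * k + 8 := by omega
      rw [h8, List.take_add]
    have hlen : ((L.drop (8 * k)).take 8).length = 8 := by
      simp only [List.length_take, List.length_drop]
      omega
    rw [hsplit, pvBinVal_append, hlen, List.range_succ, List.map_append, List.map_cons,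
        List.map_nil, pvValBE_snoc, ih hk']
    have h28 : (2:ℕ) ^ 8 = 256 := by norm_num
    rw [h28, Nat.mul_comm]
    rfl

theorem pvLoopA (L : List Char) (k : Nat) (hk : 8 * k ≤ L.length)
    (hbin : ∀ c ∈ L.take (8 * k), c = '0' ∨ c = '1') :
    ((List.range k).map (fun t : Nat => ((8 * t : Nat) : Int))).foldl
        (fun (acc : Option (List Nat)) i =>
          match acc, pvIntBase2? (PySem.List.slice L (some i) (some (i + 8))) with
          | some msg, some v => some (msg ++ [v])
          | _, _ => none) (some [])
      = some ((List.range k).map (pvChunk L)) := by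
  induction k with
  | zero => rfl
  | succ k ih =>
    have hk' : 8 * k ≤ L.length := by omega
    have hsub : ∀ c ∈ L.take (8 * k), c = '0' ∨ c = '1' := by
      intro c hc
      apply hbin
      have heq : L.take (8 * k) = (L.take (8 * (k+1))).take (8 * k) := by
        rw [List.take_take]
        congr 1
        omega
      rw [heq] at hc
      exact List.mem_of_mem_take hc
    have hchunkmem : ∀ c ∈ (L.drop (8 * k)).take 8, c = '0' ∨ c = '1' := by
      intro c hc
      apply hbin
      have hsplit : L.take (8 * (k+1)) = L.take (8 * k) ++ (L.drop (8 * k)).take 8 := by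
        have h8 : 8 * (k+1) = 8 * k + 8 := by omega
        rw [h8, List.take_add]
      rw [hsplit]
      exact List.mem_append_right _ hc
    have hlen : ((L.drop (8 * k)).take 8).length = 8 := by
      simp only [List.length_take, List.length_drop]; omega
    have hne : (L.drop (8 * k)).take 8 ≠ [] := by
      intro h
      rw [h] at hlen
      exact absurd hlen (by decide)
    have hslice : PySem.List.slice L (some ((8 * k : Nat) : Int)) (some (((8 * k : Nat) : Int) + 8)) = (L.drop (8 * k)).take 8 := by
      have := PySem.List.slice_natCast_add L (8 * k) 8
      push_cast at this ⊢
      exact this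
    simp only [List.range_succ, List.map_append, List.map_cons, List.map_nil,
      List.foldl_append, List.foldl_cons, List.foldl_nil]
    rw [ih hk' hsub]
    rw [hslice, pvIntBase2?_eq _ hne hchunkmem]
    rfl

theorem pvMain (bits : String) (byte_length : Int)
    (hpre : Pre_bits_to_message_by_length bits byte_length) :
    bits_to_message_by_length bits byte_length = bits_to_message_by_length_alt bits byte_length := by
  unfold bits_to_message_by_length bits_to_message_by_length_alt
  have hl : PySem.Str.len bits = (bits.toList.length : Int) := PySem.Str.len_eq bits
  by_cases hlt : PySem.Str.len bits < byte_length * 8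
  · rw [if_pos hlt, if_pos hlt]
  · simp only [hlt, if_false]
    rw [hl] at hlt
    by_cases hz : byte_length * 8 ≤ 0
    · have hrange : PySem.List.pyRange 0 (byte_length * 8) 8 = [] := by
        rw [PySem.List.pyRange_of_pos 0 (byte_length * 8) (by norm_num)]
        have h0 : ¬ ((0:Int) < byte_length * 8) := by omega
        simp [h0]
      rw [hrange]
      simp only [List.foldl_nil, hz, if_true]
      rfl
    · have hblpos : 0 < byte_length := by nlinarith
      obtain ⟨k, hk⟩ : ∃ k : Nat, byte_length = (k : Int) := ⟨byte_length.toNat, by omega⟩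
      subst hk
      have hkpos : 0 < k := by exact_mod_cast hblpos
      have hklen : 8 * k ≤ bits.toList.length := by omega
      have hbin : ∀ c ∈ bits.toList.take (8 * k), c = '0' ∨ c = '1' := by
        rcases hpre with h | h | h
        · omega
        · rw [hl] at h; omega
        · intro c hc
          have hh : ((k : Int) * 8).toNat = 8 * k := by omega
          rw [hh] at h
          have hx := List.all_eq_true.mp h c hc
          simpa using hx
      have hfun : (fun t : Nat => ((0:Int) + 8 * (t:Int))) = (fun t : Nat => ((8 * t : Nat) : Int)) := by
        funext t; push_cast; ring
      have hrange : PySem.List.pyRange 0 ((k:Int) * 8) 8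
          = (List.range k).map (fun t : Nat => ((8 * t : Nat) : Int)) := by
        rw [PySem.List.pyRange_of_pos 0 ((k:Int)*8) (by norm_num)]
        have hpos : (0:Int) < (k:Int) * 8 := by positivity
        simp only [hpos, if_true]
        have hc : (((k:Int) * 8 - 0 + 8 - 1) / 8).toNat = k := by
          have he : ((k:Int) * 8 - 0 + 8 - 1) = ((8 * k + 7 : Nat) : Int) := by push_cast; ring
          rw [he, show ((8:Int)) = ((8:Nat):Int) by norm_num, ← Int.natCast_ediv]
          omega
        rw [hc, hfun]
      rw [hrange, pvLoopA bits.toList k hklen hbin]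
      have hsl : PySem.List.slice bits.toList none (some ((k:Int) * 8)) = bits.toList.take (8 * k) := by
        rw [PySem.List.slice_to _ (by positivity)]
        congr 1
        omega
      have hPne : bits.toList.take (8 * k) ≠ [] := by
        have hlen8 : (bits.toList.take (8 * k)).length = 8 * k := by
          simp only [List.length_take]; omega
        intro h; rw [h] at hlen8; simp at hlen8; omega
      rw [hsl, pvParseBin_eq _ hPne hbin]
      have hto : ((k:Int)).toNat = k := by omega
      have hbytes : pvToBytesBE ((k:Int)).toNat (pvBinVal (bits.toList.take (8 * k)))
          = (List.range k).map (pvChunk bits.toList) := by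
        rw [hto]
        apply List.ext_getElem
        · simp [pvToBytesBE]
        · intro i hi1 hi2
          have hiK : i < k := by simpa [pvToBytesBE] using hi1
          have hmem : ∀ v ∈ (List.range k).map (pvChunk bits.toList), v < 256 := by
            intro v hv
            simp only [List.mem_map] at hv
            obtain ⟨j, _, rfl⟩ := hv
            have h1 := pvBinVal_lt ((bits.toList.drop (8 * j)).take 8)
            have h2 : ((bits.toList.drop (8 * j)).take 8).length ≤ 8 := by
              simp [List.length_take]
            calc pvChunk bits.toList j < 2 ^ ((bits.toList.drop (8 * j)).take 8).length := h1
              _ ≤ 2 ^ 8 := Nat.pow_le_pow_right (by norm_num) h2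
              _ = 256 := by norm_num
          have hdig := pvValBE_digit _ hmem i (by simpa using hiK)
          simp only [List.length_map, List.length_range, List.getElem_map, List.getElem_range] at hdig
          rw [← pvPrefix_val bits.toList k hklen] at hdig
          simp only [pvToBytesBE, List.getElem_map, List.getElem_range]
          exact hdig
      simp only [hz, if_false, Option.map_some]
      rw [hbytes, pvDecodeSM_eq]

-- ===== VERDICT (by name: the statement is the Claim_ definition above) =====
theorem bits_to_message_by_length_spec : Claim_equal_bits_to_message_by_length := by
  intro bits byte_length _ hpre
  exact pvMain bits byte_length hpre
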